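-- pv_equiv track=rewrite | github.com/DeveloperChoi90/python_basic | woteco_4.py | solution
-- ===== SOURCE A (Python) =====
-- def solution(s):
--     answer = []
--     idx = 0
--     length = len(s)
--     count = 1
--
--     for idx in range(length):
--         if (idx + 1) < length:
--             if s[idx] == s[idx + 1]:
--                 count += 1
--             else:
--                 answer.append(count)
--                 count = 1
--         else:
--             if s[0] == s[idx]:
--                 answer[0] = answer[0] + count
--             else:
--                 answer.append(count)
--
--     answer = sorted(answer)
--     return answer
-- ===== SOURCE B (Python) =====
-- def solution(s):
--     # Boundary-index algorithm: run counts are the gaps between consecutive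
--     # "change positions" (indices i with s[i-1] != s[i]); the wraparound merge
--     # (s[0] == s[-1]) is the circular gap across the ends.
--     n = len(s)
--     if n == 0:
--         return []
--     cuts = [i for i in range(1, n) if s[i - 1] != s[i]]
--     if s[0] != s[-1]:
--         gaps = [b - a for a, b in zip([0] + cuts, cuts + [n])]
--     else:
--         gaps = [b - a for a, b in zip(cuts, cuts[1:])]
--         gaps.append(n - cuts[-1] + cuts[0])  # IndexError when cuts is empty, as in A
--     return sorted(gaps)
-- ===== Notes on version B (the rewrite author's own statement) =====
-- stated objective: alternative
-- what changed: B computes the list of boundary indices (positions where adjacent characters differ) with index arithmetic and derives the run counts as gaps between consecutive boundaries (with a circular gap across the ends when s[0]==s[-1]), instead of A's single-pass counter loop that compares s[idx] with s[idx+1] and handles the last index as an in-loop merge branch.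
import Mathlib
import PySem

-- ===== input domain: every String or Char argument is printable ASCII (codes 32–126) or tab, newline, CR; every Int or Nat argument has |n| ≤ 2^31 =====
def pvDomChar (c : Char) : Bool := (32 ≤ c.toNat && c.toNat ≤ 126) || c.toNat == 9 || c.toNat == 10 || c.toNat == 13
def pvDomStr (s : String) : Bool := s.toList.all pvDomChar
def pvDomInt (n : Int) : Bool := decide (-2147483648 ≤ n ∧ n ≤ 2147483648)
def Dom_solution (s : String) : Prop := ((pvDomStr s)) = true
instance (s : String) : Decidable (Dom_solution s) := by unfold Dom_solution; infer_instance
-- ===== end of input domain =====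

-- B replaces A's single-pass counter loop by boundary-index arithmetic: it lists the
-- change positions (i with s[i-1] != s[i]) and reads the run counts off as the gaps
-- between consecutive boundaries (circular gap across the ends when s[0] == s[-1]).
-- Both Pythons raise IndexError on nonempty all-same-character strings (excluded by Pre_).

-- ===== PORT A =====
-- loop body of A's 'for idx in range(length)'; indices are the naturals 0..length-1, so
-- Nat range / l[i]? indexing are exact here.  'answer[0] = answer[0] + count' raises
-- IndexError in Python when answer is empty, which happens exactly on the nonempty
-- all-same-char strings Pre_solution excludes (the port's set/getD are a no-op there).
def stepA (length : Nat) (l : List Char) (st : List Int × Int) (idx : Nat) : List Int × Int :=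
  if idx + 1 < length then
    if l[idx]? = l[idx + 1]? then (st.1, st.2 + 1)
    else (st.1 ++ [st.2], 1)
  else
    if l[0]? = l[idx]? then (st.1.set 0 (st.1.getD 0 0 + st.2), st.2)
    else (st.1 ++ [st.2], st.2)

def solution (s : String) : List Int :=
  let l := s.toList
  let length := l.length
  let res := (List.range length).foldl (stepA length l) ([], 1)
  PySem.List.sorted res.1 (fun x => x) false

-- ===== PORT B =====
-- 'cuts[-1]' / 'cuts[0]' raise IndexError in Python when cuts is empty — exactly the
-- inputs Pre_solution excludes (the port's getLastD/headD defaults are never reached);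
-- 'cuts[1:]' on a list of ints is its tail.
def solution_alt (s : String) : List Int :=
  let l := s.toList
  let n := l.length
  if n = 0 then []
  else
    let cuts := (PySem.List.pyRange 1 (n : Int) 1).filter
      (fun i => !(PySem.List.pyGet? l (i - 1) == PySem.List.pyGet? l i))
    let gaps :=
      if PySem.List.pyGet? l 0 ≠ PySem.List.pyGet? l (-1) then
        (((0 : Int) :: cuts).zip (cuts ++ [(n : Int)])).map (fun p => p.2 - p.1)
      else
        ((cuts.zip cuts.tail).map (fun p => p.2 - p.1))
          ++ [(n : Int) - cuts.getLastD 0 + cuts.headD 0]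
    PySem.List.sorted gaps (fun x => x) false

-- ===== PRECONDITION & SPEC =====
-- Pre_ excludes exactly the nonempty strings whose characters are all equal: there
-- BOTH Pythons raise IndexError (A on answer[0], B on cuts[-1]).
def Pre_solution (s : String) : Prop :=
  s.toList.all (fun c => c == s.toList.headD ' ') = true → s.toList = []
instance (s : String) : Decidable (Pre_solution s) := by unfold Pre_solution; infer_instance
def pvWitness_solution : String := "ab"

def Spec_solution (s : String) (out : List Int) : Prop := out = solution_alt s
instance (s : String) (out : List Int) : Decidable (Spec_solution s out) := by unfold Spec_solution; infer_instance

-- ===== CLAIM (what is proved, stated in full; the proofs are below) =====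
def Claim_equal_solution : Prop := ∀ (s : String), Dom_solution s → Pre_solution s → Spec_solution s (solution s)

-- ===== LEMMAS AND PROOFS =====

-- the state transformer of A's loop body on the non-final indices, as a function of the
-- adjacent character pair
def step2 (st : List Int × Int) (p : Char × Char) : List Int × Int :=
  if p.1 = p.2 then (st.1, st.2 + 1) else (st.1 ++ [st.2], 1)

-- positions (from offset j) of the unequal adjacent pairs: the boundary indices
def fpos (ps : List (Char × Char)) (j : Int) : List Int :=
  match ps with
  | [] => []
  | p :: ps => if p.1 = p.2 then fpos ps (j + 1) else j :: fpos ps (j + 1)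

-- successive differences
def diffs (xs : List Int) : List Int := (xs.zip xs.tail).map (fun p => p.2 - p.1)

theorem diffs_cons_cons (x y : Int) (t : List Int) :
    diffs (x :: y :: t) = (y - x) :: diffs (y :: t) := rfl

theorem foldl_range_eq_zip (l : List Char) (m : Nat) (hm : m + 1 = l.length)
    (init : List Int × Int) :
    (List.range m).foldl (stepA (m + 1) l) init = (l.zip l.tail).foldl step2 init := by
  have hmap : (List.range m).map (fun i => (l.getD i ' ', l.getD (i + 1) ' ')) = l.zip l.tail := by
    apply List.ext_getElem
    · simp; omega
    · intro i h1 h2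
      have hi : i < m := by simpa using h1
      have h0 : i < l.length := by omega
      have h1' : i + 1 < l.length := by omega
      have ht : i < l.tail.length := by simp; omega
      simp [List.getElem_zip, List.getElem_tail, List.getElem?_eq_getElem h0,
            List.getElem?_eq_getElem h1']
  rw [← hmap, List.foldl_map]
  apply PySem.List.foldl_congr_mem
  intro acc i hi
  have him : i < m := List.mem_range.mp hi
  have h0 : i < l.length := by omega
  have h1 : i + 1 < l.length := by omega
  have hlt : i + 1 < m + 1 := by omega
  simp [stepA, step2, hlt, List.getElem?_eq_getElem h0, List.getElem?_eq_getElem h1]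

theorem getLastD_cons_cons (x y : Int) (t : List Int) (d : Int) :
    (x :: y :: t).getLastD d = (y :: t).getLastD d := by
  simp

-- A's pair loop, in terms of boundary positions: the answer so far is the list of gaps
-- between consecutive boundaries and the running count is the distance past the last one
theorem fold_step2 (ps : List (Char × Char)) :
    ∀ (j : Int) (ans : List Int) (c : Int),
      ps.foldl step2 (ans, c)
        = (ans ++ diffs ((j + 1 - c) :: fpos ps (j + 1)),
           (j + 1 + ps.length) - ((j + 1 - c) :: fpos ps (j + 1)).getLastD 0) := by
  induction ps with
  | nil =>
    intro j ans c
    simp only [List.foldl_nil, fpos, Prod.mk.injEq, List.length_nil]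
    refine ⟨by simp [diffs], ?_⟩
    have h1 : ([j + 1 - c] : List Int).getLastD 0 = j + 1 - c := rfl
    rw [h1]
    push_cast
    ring
  | cons p ps ih =>
    intro j ans c
    by_cases hp : p.1 = p.2
    · have hs : step2 (ans, c) p = (ans, c + 1) := by simp [step2, hp]
      rw [List.foldl_cons, hs, ih (j + 1) ans (c + 1)]
      have he : (j + 1 + 1 - (c + 1)) = (j + 1 - c) := by ring
      simp only [fpos, if_pos hp, he, Prod.mk.injEq, List.length_cons]
      refine ⟨trivial, by push_cast; ring⟩
    · have hs : step2 (ans, c) p = (ans ++ [c], 1) := by simp [step2, hp]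
      rw [List.foldl_cons, hs, ih (j + 1) (ans ++ [c]) 1]
      simp only [fpos, if_neg hp]
      have he : (j + 1 + 1 - 1) = j + 1 := by ring
      rw [he]
      simp only [Prod.mk.injEq, List.length_cons]
      constructor
      · rw [diffs_cons_cons]
        have h2 : j + 1 - (j + 1 - c) = c := by ring
        rw [h2, List.append_assoc]
        rfl
      · rw [getLastD_cons_cons]
        push_cast
        ring

-- B's filtered range of indices IS the boundary-position list of the pair list
theorem cuts_eq_fpos (L : List Char) :
    ∀ (as : List Char) (a : Char) (j : Nat), L.drop j = a :: as →
      (PySem.List.pyRange ((j : Int) + 1) (L.length : Int) 1).filter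
          (fun i => !(PySem.List.pyGet? L (i - 1) == PySem.List.pyGet? L i))
        = fpos ((a :: as).zip as) ((j : Int) + 1) := by
  intro as
  induction as with
  | nil =>
    intro a j hd
    have hlen : L.length = j + 1 := by
      have := congrArg List.length hd; simp at this; omega
    rw [PySem.List.pyRange_one_eq_nil (by omega : (L.length : Int) ≤ (j : Int) + 1)]
    rfl
  | cons b rest ih =>
    intro a j hd
    have hlen : j + 1 < L.length := by
      have := congrArg List.length hd; simp at this; omega
    have hja : L[j]? = some a := by
      rw [← List.head?_drop, hd]; rfl
    have hjb : L[j + 1]? = some b := by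
      have : L.drop (j + 1) = b :: rest := by
        have : L.drop (j + 1) = (L.drop j).drop 1 := by rw [List.drop_drop]
        rw [this, hd]; rfl
      rw [← List.head?_drop, this]; rfl
    have hcons : PySem.List.pyRange ((j : Int) + 1) (L.length : Int) 1
        = ((j : Int) + 1) :: PySem.List.pyRange ((j : Int) + 1 + 1) (L.length : Int) 1 :=
      PySem.List.pyRange_one_cons (by omega)
    have hg1 : PySem.List.pyGet? L ((j : Int) + 1 - 1) = some a := by
      have : (j : Int) + 1 - 1 = ((j : Nat) : Int) := by ring
      rw [this, PySem.List.pyGet?_natCast, hja]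
    have hg2 : PySem.List.pyGet? L ((j : Int) + 1) = some b := by
      have : (j : Int) + 1 = (((j + 1 : Nat)) : Int) := by push_cast; ring
      rw [this, PySem.List.pyGet?_natCast, hjb]
    have hdrop : L.drop (j + 1) = b :: rest := by
      have h1 : L.drop (j + 1) = (L.drop j).drop 1 := by rw [List.drop_drop]
      rw [h1, hd]; rfl
    have ihb := ih b (j + 1) hdrop
    have hcast : (((j + 1 : Nat)) : Int) = (j : Int) + 1 := by push_cast; ring
    rw [hcast] at ihb
    rw [hcons, List.filter_cons]
    have hzip : (a :: b :: rest).zip (b :: rest) = (a, b) :: (b :: rest).zip rest := rfl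
    rw [hzip]
    by_cases hab : a = b
    · have : (!(PySem.List.pyGet? L ((j : Int) + 1 - 1) == PySem.List.pyGet? L ((j : Int) + 1))) = false := by
        rw [hg1, hg2, hab]; simp
      rw [this, if_neg (by simp), ihb]
      simp [fpos, hab]
    · have : (!(PySem.List.pyGet? L ((j : Int) + 1 - 1) == PySem.List.pyGet? L ((j : Int) + 1))) = true := by
        rw [hg1, hg2]; simpa using hab
      rw [this, if_pos rfl, ihb]
      simp [fpos, hab]

-- no boundary ⇒ all characters equal the first
theorem fpos_nil_all_eq : ∀ (as : List Char) (a : Char) (j : Int),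
    fpos ((a :: as).zip as) j = [] → ∀ c ∈ a :: as, c = a := by
  intro as
  induction as with
  | nil => intro a j _ c hc; simpa using hc
  | cons b rest ih =>
    intro a j h c hc
    have hzip : (a :: b :: rest).zip (b :: rest) = (a, b) :: (b :: rest).zip rest := rfl
    rw [hzip] at h
    by_cases hab : a = b
    · simp only [fpos, if_pos hab] at h
      rcases List.mem_cons.mp hc with h1 | h2
      · exact h1
      · rw [hab]; exact ih b (j + 1) h c h2
    · simp [fpos, hab] at h

-- gaps over zip((0::cuts), cuts++[n]) = inner diffs plus the final gap to n
theorem zip_shift_gaps : ∀ (xs : List Int) (x y : Int),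
    ((x :: xs).zip (xs ++ [y])).map (fun p => p.2 - p.1)
      = diffs (x :: xs) ++ [y - (x :: xs).getLastD 0] := by
  intro xs
  induction xs with
  | nil => intro x y; simp [diffs]
  | cons z t ih =>
    intro x y
    have hz : (x :: z :: t).zip ((z :: t) ++ [y]) = (x, z) :: ((z :: t).zip (t ++ [y])) := rfl
    rw [hz, List.map_cons, ih z y, diffs_cons_cons]
    simp

-- ===== VERDICT (by name: the statement is the Claim_ definition above) =====
theorem solution_spec : Claim_equal_solution := by
  unfold Claim_equal_solution Spec_solution
  intro s _ hpre
  unfold Pre_solution at hpre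
  simp only [solution, solution_alt]
  cases hl : s.toList with
  | nil => simp [PySem.List.sorted_eq_nil_iff]
  | cons a as =>
    have hlen : (a :: as).length = as.length + 1 := by simp
    have hne : (a :: as).length ≠ 0 := by simp
    rw [if_neg hne]
    -- A side: split the loop, rewrite it over adjacent pairs, apply the invariant
    rw [hlen, List.range_succ, List.foldl_append,
        foldl_range_eq_zip (a :: as) as.length (by simp) ([], 1),
        fold_step2 ((a :: as).zip (a :: as).tail) 0 [] 1, List.foldl_cons, List.foldl_nil]
    -- cuts = boundary positions
    have hcuts := cuts_eq_fpos (a :: as) as a 0 (by simp)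
    rw [hlen] at hcuts
    have h01 : ((0 : Nat) : Int) + 1 = 1 := by norm_num
    rw [h01] at hcuts
    have hply : ((a :: as).zip as).length = as.length := by simp
    simp only [hcuts, List.nil_append, List.tail_cons, hply,
               show ((0 : Int) + 1) = 1 from by norm_num,
               show ((1 : Int) - 1) = 0 from by norm_num]
    set cuts := fpos ((a :: as).zip as) 1 with hcutsdef
    -- the final loop iteration of A (idx = length-1)
    have h0e : (a :: as)[0]? = some a := rfl
    have hlast : (a :: as)[as.length]? = (a :: as).getLast? := by
      rw [List.getLast?_eq_getElem?, hlen]; simp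
    have hgn0 : PySem.List.pyGet? (a :: as) 0 = (a :: as)[0]? := by
      simpa using PySem.List.pyGet?_natCast (a :: as) 0
    have hgm1 : PySem.List.pyGet? (a :: as) (-1) = (a :: as).getLast? :=
      PySem.List.pyGet?_neg_one (a :: as)
    unfold stepA
    rw [if_neg (by omega : ¬ (as.length + 1 < as.length + 1))]
    rw [hgn0, hgm1]
    dsimp only
    by_cases hm : (a :: as)[0]? = (a :: as)[as.length]?
    · -- wraparound merge: s[0] == s[-1]
      rw [if_pos hm, if_neg (by rw [hlast] at hm; simpa using hm)]
      -- cuts is nonempty under Pre_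
      rcases hc : cuts with _ | ⟨c1, cs⟩
      · exfalso
        have hall := fpos_nil_all_eq as a 1 (by rw [← hcutsdef, hc])
        have hnil : s.toList = [] := by
          apply hpre
          rw [hl]
          simp only [List.all_eq_true]
          intro c hcmem
          simpa using hall c hcmem
        rw [hl] at hnil; cases hnil
      · rw [diffs_cons_cons]
        have hset : ((c1 - 0) :: diffs (c1 :: cs)).set 0
            (((c1 - 0) :: diffs (c1 :: cs)).getD 0 0 +
              ((1 : Int) + (as.length : Int) - ((0 : Int) :: c1 :: cs).getLastD 0))
            = (c1 - 0 + ((1 : Int) + (as.length : Int) - ((0 : Int) :: c1 :: cs).getLastD 0))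
              :: diffs (c1 :: cs) := rfl
        rw [hset, PySem.List.sorted_id_eq_sorted_id_iff_perm, getLastD_cons_cons]
        have hval : c1 - 0 + ((1 : Int) + (as.length : Int) - (c1 :: cs).getLastD 0)
            = ((as.length + 1 : Nat) : Int) - (c1 :: cs).getLastD 0 + (c1 :: cs).headD 0 := by
          simp [List.headD]
          ring
        rw [hval]
        exact (List.perm_append_singleton _ _).symm
    · -- no wraparound: append the final count
      rw [if_neg hm, if_pos (by rw [hlast] at hm; simpa [h0e] using hm)]
      rw [zip_shift_gaps cuts 0 (((as.length + 1 : Nat)) : Int)]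
      have hn : (1 : Int) + (as.length : Int) = (((as.length + 1 : Nat)) : Int) := by
        push_cast; ring
      rw [hn]
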